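-- pv_equiv track=rewrite | github.com/N3XT14/jain_panchang | ml_kit/edge_detect.py | get_coordinates_vertical
-- ===== SOURCE A (Python) =====
-- def get_coordinates_vertical(valArray1, valArray2, minVal, maxVal, width, height) -> list:
--     line_coordinates = []
--
--     # Generate coordinates for the left side
--     d = {}
--     for value, count in valArray1:
--         y_values_for_x = [y for y, _ in valArray2 if minVal <= y <= maxVal]
--         for y in y_values_for_x:
--             if y in d:
--                 continue
--             line_coordinates.append((value, y))
--             d[y] = 1
--             count -= 1
--             if count == 0:
--                 line_coordinates.append((value, y + height))
--                 break
--
--     # Generate coordinates for the right side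
--     d = {}
--     for value, count in valArray1[::-1]:
--         y_values_for_x = [y for y, _ in valArray2 if minVal <= y <= maxVal]
--         for y in y_values_for_x:
--             if y in d:
--                 continue
--             line_coordinates.append((value + width, y))
--             d[y] = 1
--             count -= 1
--             if count == 0:
--                 line_coordinates.append((value + width, y + height))
--                 break
--     return line_coordinates
-- ===== SOURCE B (Python) =====
-- def _pv_side(vals, yu, off, height):
--     out = []
--     idx = 0
--     for value, count in vals:
--         v = value + off
--         while idx < len(yu):
--             y = yu[idx]
--             idx += 1
--             out.append((v, y))
--             count -= 1
--             if count == 0: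
--                 out.append((v, y + height))
--                 break
--     return out
--
--
-- def get_coordinates_vertical(valArray1, valArray2, minVal, maxVal, width, height) -> list:
--     yu = list(dict.fromkeys(y for y, _ in valArray2 if minVal <= y <= maxVal))
--     return _pv_side(valArray1, yu, 0, height) + _pv_side(valArray1[::-1], yu, width, height)
-- ===== Notes on version B (the rewrite author's own statement) =====
-- stated objective: faster
-- what changed: B computes the filtered y-list once and deduplicates it up front, then replaces A's per-row rescan of valArray2 with dict-membership skipping by a single pointer that walks the unique y-list once per side, persisting across the outer loop.
import Mathlib
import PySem

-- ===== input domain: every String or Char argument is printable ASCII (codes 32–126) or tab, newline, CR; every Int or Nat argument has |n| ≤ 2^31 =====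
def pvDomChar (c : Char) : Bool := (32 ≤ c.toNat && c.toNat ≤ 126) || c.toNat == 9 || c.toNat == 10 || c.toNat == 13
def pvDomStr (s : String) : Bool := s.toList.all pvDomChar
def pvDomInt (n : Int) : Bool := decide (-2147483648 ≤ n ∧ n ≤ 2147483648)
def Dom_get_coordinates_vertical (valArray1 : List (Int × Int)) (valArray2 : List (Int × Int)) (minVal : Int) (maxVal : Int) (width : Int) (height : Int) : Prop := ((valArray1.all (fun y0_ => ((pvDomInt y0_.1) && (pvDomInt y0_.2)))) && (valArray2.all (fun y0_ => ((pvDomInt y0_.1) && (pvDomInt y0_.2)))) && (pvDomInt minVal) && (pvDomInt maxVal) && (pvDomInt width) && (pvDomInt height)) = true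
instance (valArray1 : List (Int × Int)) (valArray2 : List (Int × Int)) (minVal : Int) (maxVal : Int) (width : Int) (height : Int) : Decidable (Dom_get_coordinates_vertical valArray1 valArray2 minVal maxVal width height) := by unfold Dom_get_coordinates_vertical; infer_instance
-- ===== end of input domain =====

-- B replaces A's per-row rescan of valArray2 plus dict-membership tests by a once-computed
-- deduplicated y-list consumed with a single persisting pointer (objective: faster, one linear walk).

-- shared helper: the list comprehension [y for y, _ in valArray2 if minVal <= y <= maxVal]
def pvFilterY (valArray2 : List (Int × Int)) (minVal maxVal : Int) : List Int :=
  (valArray2.filter (fun p => decide (minVal ≤ p.1) && decide (p.1 ≤ maxVal))).map Prod.fst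

-- ===== PORT A =====
-- inner 'for y in y_values_for_x' loop (with continue/break); off is 0 on the left pass, width on the right
def pvInnerA (v h : Int) : List Int → List (Int × Int) → PySem.Dict Int Int → Int → List (Int × Int) × PySem.Dict Int Int
  | [], acc, d, _ => (acc, d)
  | y :: t, acc, d, count =>
    if d.contains y then pvInnerA v h t acc d count
    else
      let acc := acc ++ [(v, y)]
      let d := d.insert y 1
      let count := count - 1
      if count == 0 then (acc ++ [(v, y + h)], d)
      else pvInnerA v h t acc d count

-- outer 'for value, count in …' loop; recomputes y_values_for_x each iteration, as A does
def pvSideA (valArray2 : List (Int × Int)) (minVal maxVal off h : Int) : List (Int × Int) → List (Int × Int) → PySem.Dict Int Int → List (Int × Int)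
  | [], acc, _ => acc
  | (value, count) :: rest, acc, d =>
    let ys := pvFilterY valArray2 minVal maxVal
    let r := pvInnerA (value + off) h ys acc d count
    pvSideA valArray2 minVal maxVal off h rest r.1 r.2

def get_coordinates_vertical (valArray1 : List (Int × Int)) (valArray2 : List (Int × Int)) (minVal : Int) (maxVal : Int) (width : Int) (height : Int) : List (Int × Int) :=
  let left := pvSideA valArray2 minVal maxVal 0 height valArray1 [] PySem.Dict.empty
  pvSideA valArray2 minVal maxVal width height valArray1.reverse left PySem.Dict.empty

-- ===== PORT B =====
-- the 'while idx < len(yu)' pointer walk of one outer iteration: returns the appended pairs and the remaining suffix of yu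
def pvWalkB (v h : Int) : List Int → Int → List (Int × Int) × List Int
  | [], _ => ([], [])
  | y :: rest, count =>
    let count := count - 1
    if count == 0 then ([(v, y), (v, y + h)], rest)
    else
      let r := pvWalkB v h rest count
      ((v, y) :: r.1, r.2)

-- '_pv_side': outer loop with the pointer (= remaining suffix of yu) persisting across iterations
def pvSideB (off h : Int) : List (Int × Int) → List Int → List (Int × Int)
  | [], _ => []
  | (value, count) :: rest, yu =>
    let r := pvWalkB (value + off) h yu count
    r.1 ++ pvSideB off h rest r.2

def get_coordinates_vertical_alt (valArray1 : List (Int × Int)) (valArray2 : List (Int × Int)) (minVal : Int) (maxVal : Int) (width : Int) (height : Int) : List (Int × Int) :=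
  let yu := PySem.List.dedup (pvFilterY valArray2 minVal maxVal)
  pvSideB 0 height valArray1 yu ++ pvSideB width height valArray1.reverse yu

-- ===== PRECONDITION & SPEC =====
def Spec_get_coordinates_vertical (valArray1 : List (Int × Int)) (valArray2 : List (Int × Int)) (minVal : Int) (maxVal : Int) (width : Int) (height : Int) (out : List (Int × Int)) : Prop := out = get_coordinates_vertical_alt valArray1 valArray2 minVal maxVal width height
instance (valArray1 : List (Int × Int)) (valArray2 : List (Int × Int)) (minVal : Int) (maxVal : Int) (width : Int) (height : Int) (out : List (Int × Int)) : Decidable (Spec_get_coordinates_vertical valArray1 valArray2 minVal maxVal width height out) := by unfold Spec_get_coordinates_vertical; infer_instance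

-- ===== CLAIM (what is proved, stated in full; the proofs are below) =====
def Claim_equal_get_coordinates_vertical : Prop := ∀ (valArray1 : List (Int × Int)) (valArray2 : List (Int × Int)) (minVal : Int) (maxVal : Int) (width : Int) (height : Int), Dom_get_coordinates_vertical valArray1 valArray2 minVal maxVal width height → Spec_get_coordinates_vertical valArray1 valArray2 minVal maxVal width height (get_coordinates_vertical valArray1 valArray2 minVal maxVal width height)

-- ===== LEMMAS AND PROOFS =====

-- remOf p ys: the unique values of ys not satisfying p, in first-occurrence order
def remOf (p : Int → Bool) : List Int → List Int
  | [] => []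
  | y :: t => if p y then remOf p t else y :: remOf (fun z => z == y || p z) t

theorem remOf_congr : ∀ (ys : List Int) (p q : Int → Bool), (∀ z, p z = q z) → remOf p ys = remOf q ys := by
  intro ys
  induction ys with
  | nil => intro p q h; rfl
  | cons y t ih =>
    intro p q h
    simp only [remOf, h y]
    by_cases hq : q y = true
    · rw [if_pos hq, if_pos hq]; exact ih p q h
    · rw [if_neg hq, if_neg hq]
      exact congrArg (List.cons y) (ih _ _ (fun z => by simp only [h]))

theorem contains_append_singleton (s : List Int) (y z : Int) :
    (s ++ [y]).contains z = (z == y || s.contains z) := by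
  by_cases hz : z = y <;> by_cases hs : z ∈ s <;> simp [hz, hs]

theorem foldl_add_eq : ∀ (ys : List Int) (s : List Int), ys.foldl PySem.Set.add s = s ++ remOf s.contains ys := by
  intro ys
  induction ys with
  | nil => intro s; simp [remOf]
  | cons y t ih =>
    intro s
    simp only [List.foldl_cons, remOf]
    have hadd : PySem.Set.add s y = if s.contains y = true then s else s ++ [y] := rfl
    by_cases hc : s.contains y = true
    · rw [hadd, if_pos hc, if_pos hc, ih]
    · rw [hadd, if_neg hc, if_neg hc, ih (s ++ [y]),
        remOf_congr t (s ++ [y]).contains (fun z => z == y || s.contains z)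
          (fun z => contains_append_singleton s y z)]
      simp

theorem dedup_eq_remOf (ys : List Int) : PySem.List.dedup ys = remOf (fun _ => false) ys := by
  rw [PySem.List.dedup_eq_ofList, PySem.Set.ofList_eq_foldl, foldl_add_eq]
  simpa using remOf_congr ys (List.contains []) (fun _ => false) (fun z => rfl)

theorem innerA_mono (v h : Int) : ∀ (ys : List Int) (acc : List (Int × Int)) (d : PySem.Dict Int Int) (count : Int) (z : Int),
    d.contains z = true → (pvInnerA v h ys acc d count).2.contains z = true := by
  intro ys
  induction ys with
  | nil => intro acc d count z hz; simpa [pvInnerA] using hz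
  | cons y t ih =>
    intro acc d count z hz
    simp only [pvInnerA]
    by_cases hc : d.contains y = true
    · simpa [hc] using ih acc d count z hz
    · simp only [Bool.not_eq_true] at hc
      have hz' : (d.insert y 1).contains z = true := by
        rw [PySem.Dict.contains_insert]; simp [hz]
      by_cases hcnt : (count - 1 == 0) = true
      · simpa [hc, hcnt] using hz'
      · simp only [Bool.not_eq_true] at hcnt
        simpa [hc, hcnt] using ih (acc ++ [(v, y)]) (d.insert y 1) (count - 1) z hz'

theorem innerA_spec (v h : Int) : ∀ (ys : List Int) (acc : List (Int × Int)) (d : PySem.Dict Int Int) (count : Int),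
    (pvInnerA v h ys acc d count).1 = acc ++ (pvWalkB v h (remOf d.contains ys) count).1
    ∧ remOf (pvInnerA v h ys acc d count).2.contains ys = (pvWalkB v h (remOf d.contains ys) count).2 := by
  intro ys
  induction ys with
  | nil => intro acc d count; simp [pvInnerA, pvWalkB, remOf]
  | cons y t ih =>
    intro acc d count
    by_cases hc : d.contains y = true
    · have hm : (pvInnerA v h t acc d count).2.contains y = true := innerA_mono v h t acc d count y hc
      have h1 := ih acc d count
      constructor
      · simpa [pvInnerA, remOf, hc] using h1.1
      · simpa [pvInnerA, remOf, hc, hm] using h1.2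
    · simp only [Bool.not_eq_true] at hc
      have hins : remOf (d.insert y 1).contains t = remOf (fun z => z == y || d.contains z) t :=
        remOf_congr t (d.insert y 1).contains (fun z => z == y || d.contains z)
          (fun z => PySem.Dict.contains_insert d y z 1)
      by_cases hcnt : (count - 1 == 0) = true
      · have hy : (d.insert y 1).contains y = true := by
          rw [PySem.Dict.contains_insert]; simp
        constructor
        · simp [pvInnerA, pvWalkB, remOf, hc, hcnt]
        · simp [pvInnerA, pvWalkB, remOf, hc, hcnt, hy, hins]
      · simp only [Bool.not_eq_true] at hcnt
        have h1 := ih (acc ++ [(v, y)]) (d.insert y 1) (count - 1)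
        have hm : (pvInnerA v h t (acc ++ [(v, y)]) (d.insert y 1) (count - 1)).2.contains y = true := by
          apply innerA_mono
          rw [PySem.Dict.contains_insert]; simp
        constructor
        · simp [pvInnerA, pvWalkB, remOf, hc, hcnt, h1.1, hins]
        · simp [pvInnerA, pvWalkB, remOf, hc, hcnt, hm, h1.2, hins]

theorem sideA_spec (valArray2 : List (Int × Int)) (minVal maxVal off h : Int) :
    ∀ (vals : List (Int × Int)) (acc : List (Int × Int)) (d : PySem.Dict Int Int),
    pvSideA valArray2 minVal maxVal off h vals acc d
      = acc ++ pvSideB off h vals (remOf d.contains (pvFilterY valArray2 minVal maxVal)) := by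
  intro vals
  induction vals with
  | nil => intro acc d; simp [pvSideA, pvSideB]
  | cons vc rest ih =>
    intro acc d
    obtain ⟨value, count⟩ := vc
    simp only [pvSideA, pvSideB]
    rw [ih]
    have h1 := innerA_spec (value + off) h (pvFilterY valArray2 minVal maxVal) acc d count
    rw [h1.1, h1.2, List.append_assoc]

theorem empty_remOf (ys : List Int) :
    remOf (PySem.Dict.empty (κ := Int) (ν := Int)).contains ys = PySem.List.dedup ys := by
  rw [dedup_eq_remOf]
  exact remOf_congr ys _ _ (fun z => by simp)

-- ===== VERDICT (by name: the statement is the Claim_ definition above) =====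
theorem get_coordinates_vertical_spec : Claim_equal_get_coordinates_vertical := by
  intro valArray1 valArray2 minVal maxVal width height _
  show _ = _
  unfold get_coordinates_vertical get_coordinates_vertical_alt
  rw [sideA_spec, sideA_spec, empty_remOf]
  simp
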